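-- pv_equiv track=rewrite | github.com/horeckyt/MUNI | tyden5/tyden5.py | censorship
-- ===== SOURCE A (Python) =====
-- def censorship(text):
--     censored = ""
--     for i in range(len(text)):
--         if i % 2 == 1:
--             censored += "x"
--         else:
--             censored += text[i]
--     return censored
-- ===== SOURCE B (Python) =====
-- def censorship(text):
--     chars = list(text)
--     chars[1::2] = 'x' * len(chars[1::2])
--     return ''.join(chars)
-- ===== Notes on version B (the rewrite author's own statement) =====
-- stated objective: idiomatic
-- what changed: Replaces the index loop with i%2 branching and repeated string concatenation by a strided slice assignment that overwrites all odd positions in a character buffer at once, then a single join.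
import Mathlib
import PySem

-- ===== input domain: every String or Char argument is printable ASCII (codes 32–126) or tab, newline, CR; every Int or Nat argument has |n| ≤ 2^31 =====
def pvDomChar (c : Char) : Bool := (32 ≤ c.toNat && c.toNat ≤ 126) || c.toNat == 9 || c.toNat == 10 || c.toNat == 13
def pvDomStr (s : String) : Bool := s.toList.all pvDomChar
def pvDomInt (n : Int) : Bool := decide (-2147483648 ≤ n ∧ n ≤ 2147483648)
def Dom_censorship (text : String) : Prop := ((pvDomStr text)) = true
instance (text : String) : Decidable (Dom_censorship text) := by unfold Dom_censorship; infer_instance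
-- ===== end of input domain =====

-- B replaces A's index loop (i % 2 branch + repeated string concatenation) by one strided
-- slice assignment over a character buffer, then a single join (idiomatic).

-- ===== PORT A =====
-- censored = ""; for i in range(len(text)): censored += "x" if i%2==1 else text[i]
def censorship (text : String) : String :=
  String.ofList ((PySem.List.pyRange 0 (PySem.Str.len text) 1).foldl
    (fun censored i =>
      censored ++ (if PySem.Int.mod i 2 == 1 then ['x'] else [PySem.List.pyGetD text.toList i ' ']))
    [])

-- ===== PORT B =====
-- chars[1::2] = 'x' * len(chars[1::2]) : overwrite every odd position with 'x' in one sweep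
def setOddX : List Char → List Char
  | [] => []
  | [c] => [c]
  | c :: _ :: rest => c :: 'x' :: setOddX rest

def censorship_alt (text : String) : String :=
  String.ofList (setOddX text.toList)

-- ===== PRECONDITION & SPEC =====
def Spec_censorship (text : String) (out : String) : Prop := out = censorship_alt text
instance (text : String) (out : String) : Decidable (Spec_censorship text out) := by unfold Spec_censorship; infer_instance

-- ===== CLAIM (what is proved, stated in full; the proofs are below) =====
def Claim_equal_censorship : Prop := ∀ (text : String), Dom_censorship text → Spec_censorship text (censorship text)

-- ===== LEMMAS AND PROOFS =====

-- both programs produce, at index k, 'x' on odd k and the original character on even k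
def oddXAt (cs : List Char) (k : Nat) : Char :=
  if k % 2 == 1 then 'x' else cs.getD k ' '

theorem setOddX_eq (cs : List Char) :
    setOddX cs = (List.range cs.length).map (oddXAt cs) := by
  match cs with
  | [] => rfl
  | [c] => rfl
  | c1 :: c2 :: rest =>
    have ih := setOddX_eq rest
    have hr : List.range (rest.length + 2) =
        0 :: 1 :: (List.range rest.length).map (fun k => k + 2) := by
      rw [List.range_succ_eq_map, List.range_succ_eq_map]
      simp [List.map_map, Function.comp]
    simp only [setOddX, List.length_cons, hr, List.map_cons, List.map_map]
    rw [ih]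
    simp only [List.cons.injEq]
    refine ⟨rfl, rfl, ?_⟩
    apply List.map_congr_left
    intro k _
    simp [oddXAt, Function.comp, Nat.add_mod_right, List.getD]

theorem censorship_eq (text : String) :
    censorship text = String.ofList ((List.range text.toList.length).map (oddXAt text.toList)) := by
  unfold censorship
  have hbody : (fun (censored : List Char) (i : Int) =>
      censored ++ (if PySem.Int.mod i 2 == 1 then ['x'] else [PySem.List.pyGetD text.toList i ' ']))
      = (fun censored i =>
      censored ++ [if PySem.Int.mod i 2 == 1 then 'x' else PySem.List.pyGetD text.toList i ' ']) := by
    funext a i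
    split <;> rfl
  rw [hbody, PySem.List.foldl_append_singleton_eq_map]
  simp only [PySem.Str.len_eq, PySem.List.pyRange_one, Int.sub_zero, Int.toNat_natCast,
    List.map_map, List.nil_append]
  congr 1
  apply List.map_congr_left
  intro k _
  have h2 : (0:Int) < 2 := by omega
  simp only [Function.comp, Int.zero_add, PySem.Int.mod_eq_emod_of_pos h2,
    PySem.List.pyGetD_natCast, oddXAt]
  rcases Nat.mod_two_eq_zero_or_one k with h | h
  · have h' : (k : Int) % 2 = 0 := by omega
    simp [h, h']
  · have h' : (k : Int) % 2 = 1 := by omega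
    simp [h, h']

-- ===== VERDICT (by name: the statement is the Claim_ definition above) =====
theorem censorship_spec : Claim_equal_censorship := by
  intro text _
  unfold Spec_censorship censorship_alt
  rw [censorship_eq, setOddX_eq]
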